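-- pv_equiv track=rewrite | github.com/nchtlv/ToFL | TFL4_null/main.py | remove_useless_rules
-- ===== SOURCE A (Python) =====
-- from collections import defaultdict
--
-- def dfs(start, graph, visited):
--     visited.add(start)
--     for point in graph[start] - visited:
--         dfs(point, graph, visited)
--
--     return visited
--
-- def remove_useless_rules(start, nonterm, grammar):
--     graph = defaultdict(set)
--     for left, right in grammar:
--         for rule in right:
--             graph[left].add(rule)
--
--     visited = set()
--     dfs(start, graph, visited)
--
--     useless = nonterm - visited
--
--     new_grammar = []
--     for left, right in grammar:
--         if left in useless or len(graph[left].intersection(useless)) > 0: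
--             continue
--         new_grammar.append((left, right))
--
--     return visited, new_grammar
-- ===== SOURCE B (Python) =====
-- def remove_useless_rules(start, nonterm, grammar):
--     # adjacency as a dict of ordered duplicate-free lists
--     succ = {}
--     for left, right in grammar:
--         bucket = succ.setdefault(left, [])
--         for s in right:
--             if s not in bucket:
--                 bucket.append(s)
--
--     # iterative worklist DFS instead of recursion
--     visited = set()
--     stack = [start]
--     while stack:
--         p = stack.pop()
--         if p not in visited:
--             visited.add(p)
--             stack.extend(reversed(succ.get(p, [])))
--
--     # one pass over the distinct left-hand sides: which lefts touch a useless symbol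
--     bad = set()
--     for left, rights in succ.items():
--         if (left in nonterm and left not in visited) or \
--            any(s in nonterm and s not in visited for s in rights):
--             bad.add(left)
--
--     new_grammar = [(l, r) for (l, r) in grammar if l not in bad]
--     return visited, new_grammar
-- ===== Notes on version B (the rewrite author's own statement) =====
-- stated objective: alternative
-- what changed: Replaces the recursive set-based DFS with an iterative worklist (explicit stack with a visited check at pop), builds the adjacency map as a dict of ordered duplicate-free lists instead of a defaultdict of sets, and precomputes the set of bad left-hand sides in one pass over the distinct lefts instead of intersecting graph[left] with the useless set again for every rule.
import Mathlib
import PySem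

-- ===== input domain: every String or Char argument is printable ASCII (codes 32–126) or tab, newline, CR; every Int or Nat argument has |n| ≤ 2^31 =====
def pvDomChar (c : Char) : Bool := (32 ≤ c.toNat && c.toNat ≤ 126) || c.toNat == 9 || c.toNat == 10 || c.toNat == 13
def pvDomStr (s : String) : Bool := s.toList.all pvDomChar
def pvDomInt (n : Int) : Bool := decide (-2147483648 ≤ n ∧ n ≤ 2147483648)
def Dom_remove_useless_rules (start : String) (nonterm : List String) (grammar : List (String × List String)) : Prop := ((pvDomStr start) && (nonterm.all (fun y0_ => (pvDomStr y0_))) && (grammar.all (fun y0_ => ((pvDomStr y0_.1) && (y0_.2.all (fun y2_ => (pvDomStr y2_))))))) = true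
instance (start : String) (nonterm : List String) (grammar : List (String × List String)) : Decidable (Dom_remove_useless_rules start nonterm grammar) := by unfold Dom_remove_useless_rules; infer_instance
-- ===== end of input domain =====

-- B replaces A's recursive set-based DFS by an explicit-stack worklist and A's per-rule
-- intersection filter by one precomputed bad-left set; alternative decomposition, same results.


-- ===== PORT A =====
-- Python dfs: visited.add(start); for point in graph[start] - visited: dfs(point).
-- Fuel is only a totality guard (Python recursion has none); the proofs show the
-- chosen fuel is never exhausted.  Set iteration is in insertion order (the returned
-- visited is a set, whose value does not depend on that order).
def dfsA (g : String → List String) : Nat → String → List String → List String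
  | 0, _, visited => visited
  | n+1, p, visited =>
    let visited' := PySem.Set.add visited p
    (PySem.Set.diff (g p) visited').foldl (fun w q => dfsA g n q w) visited'

def remove_useless_rules (start : String) (nonterm : List String) (grammar : List (String × List String)) : List String × (List (String × List String)) :=
  -- graph = defaultdict(set); for left, right in grammar: for rule in right: graph[left].add(rule)
  let graph : PySem.Dict String (PySem.Set String) :=
    grammar.foldl (fun d pr =>
      pr.2.foldl (fun d2 rule => d2.insert pr.1 (PySem.Set.add (d2.getD pr.1 []) rule)) d)
      PySem.Dict.empty
  let g := fun x => graph.getD x []          -- defaultdict read: missing key = empty set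
  let fuel := (start :: grammar.flatMap (fun pr => pr.1 :: pr.2)).length + 1
  let visited := dfsA g fuel start []
  -- useless = nonterm - visited
  let useless := PySem.Set.diff nonterm visited
  -- for left, right in grammar: skip if left in useless or len(graph[left] & useless) > 0
  let newG := grammar.foldl (fun acc pr =>
    if PySem.Set.contains useless pr.1 || decide (0 < (PySem.Set.inter (g pr.1) useless).length)
    then acc else acc ++ [pr]) []
  (visited, newG)

-- ===== PORT B =====
-- Worklist loop of Source B.  The Lean list holds Python's stack reversed (head = top):
-- p = stack.pop() is the head, stack.extend(reversed(bucket)) prepends the bucket.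
-- Fuel is only a totality guard for the while loop; the proofs show it suffices.
def stackB (g : String → List String) : Nat → List String → List String → List String
  | _, [], visited => visited
  | 0, _ :: _, visited => visited
  | n+1, p :: st, visited =>
    if PySem.Set.contains visited p then stackB g (n+1) st visited
    else stackB g n (g p ++ st) (PySem.Set.add visited p)
  termination_by n st _ => (n, st.length)

def remove_useless_rules_alt (start : String) (nonterm : List String) (grammar : List (String × List String)) : List String × (List (String × List String)) :=
  -- succ = {}; bucket = succ.setdefault(left, []); append right symbols not already present
  let succ : PySem.Dict String (List String) :=
    grammar.foldl (fun d pr =>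
      d.insert pr.1 (pr.2.foldl (fun b s => if b.contains s then b else b ++ [s]) (d.getD pr.1 [])))
      PySem.Dict.empty
  let g := fun x => succ.getD x []           -- succ.get(p, [])
  let fuel := (start :: grammar.flatMap (fun pr => pr.1 :: pr.2)).length + 1
  let visited := stackB g fuel [start] []
  -- bad = lefts that are useless or have a useless right symbol, one pass over succ.items()
  let bad : PySem.Set String :=
    succ.items.foldl (fun b pr =>
      if (nonterm.contains pr.1 && !(visited.contains pr.1))
         || pr.2.any (fun s => nonterm.contains s && !(visited.contains s))
      then PySem.Set.add b pr.1 else b) []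
  let newG := grammar.filter (fun pr => !(PySem.Set.contains bad pr.1))
  (visited, newG)

-- ===== PRECONDITION & SPEC =====
def Spec_remove_useless_rules (start : String) (nonterm : List String) (grammar : List (String × List String)) (out : List String × (List (String × List String))) : Prop := out = remove_useless_rules_alt start nonterm grammar
instance (start : String) (nonterm : List String) (grammar : List (String × List String)) (out : List String × (List (String × List String))) : Decidable (Spec_remove_useless_rules start nonterm grammar out) := by unfold Spec_remove_useless_rules; infer_instance

-- ===== CLAIM (what is proved, stated in full; the proofs are below) =====
def Claim_equal_remove_useless_rules : Prop := ∀ (start : String) (nonterm : List String) (grammar : List (String × List String)), Dom_remove_useless_rules start nonterm grammar → Spec_remove_useless_rules start nonterm grammar (remove_useless_rules start nonterm grammar)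

-- ===== LEMMAS AND PROOFS =====

-- μ U v = how many elements of U are not yet in v (termination potential of the searches)
def pvMu (U v : List String) : Nat := (U.filter (fun x => !(v.contains x))).length

theorem pv_countP_strict (p q : String → Bool) :
    ∀ (U : List String), (∀ x ∈ U, p x = true → q x = true) →
    ∀ a ∈ U, q a = true → p a = false → U.countP p < U.countP q := by
  intro U
  induction U with
  | nil => intro _ a ha; cases ha
  | cons b U ih =>
    intro h a ha hqa hpa
    have hmono : U.countP p ≤ U.countP q :=
      List.countP_mono_left (fun x hx => h x (List.mem_cons_of_mem _ hx))
    rcases List.mem_cons.mp ha with rfl | ha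
    · simp only [List.countP_cons, hpa, hqa]
      simp
      omega
    · have := ih (fun x hx => h x (List.mem_cons_of_mem _ hx)) a ha hqa hpa
      simp only [List.countP_cons]
      have hb := h b List.mem_cons_self
      by_cases hpb : p b = true
      · simp [hpb, hb hpb]; omega
      · simp only [Bool.not_eq_true] at hpb
        simp [hpb]; split <;> omega

theorem pvMu_le_of_subset (U v w : List String) (h : ∀ x, x ∈ v → x ∈ w) :
    pvMu U w ≤ pvMu U v := by
  unfold pvMu
  rw [← List.countP_eq_length_filter, ← List.countP_eq_length_filter]
  apply List.countP_mono_left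
  intro x _ hx
  simp only [Bool.not_eq_true', List.contains_eq_mem, decide_eq_false_iff_not] at hx ⊢
  exact fun hxv => hx (h x hxv)

theorem pvMu_add_lt (U v : List String) (p : String) (hU : p ∈ U) (hv : p ∉ v) :
    pvMu U (PySem.Set.add v p) < pvMu U v := by
  unfold pvMu
  rw [PySem.Set.add_of_not_mem hv,
    ← List.countP_eq_length_filter, ← List.countP_eq_length_filter]
  apply pv_countP_strict _ _ U _ p hU
  · simp [hv]
  · simp
  · intro x _ hx
    simp only [Bool.not_eq_true', List.contains_eq_mem, decide_eq_false_iff_not,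
      List.mem_append, List.mem_singleton] at hx ⊢
    exact fun hxv => hx (Or.inl hxv)

-- ideal (fuel-free) worklist semantics; only reached through states with stack ⊆ U
def pvReach (g : String → List String) (U : List String) : List String → List String → List String
  | [], v => v
  | p :: st, v =>
    if p ∈ v ∨ p ∉ U then pvReach g U st v
    else pvReach g U (g p ++ st) (PySem.Set.add v p)
  termination_by st v => (pvMu U v, st.length)
  decreasing_by
    · exact Prod.Lex.right _ (Nat.lt_succ_self _)
    · rename_i h
      push Not at h
      exact Prod.Lex.left _ _ (pvMu_add_lt U v p h.2 h.1)

theorem pvReach_nil (g : String → List String) (U v : List String) : pvReach g U [] v = v := by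
  simp [pvReach]

theorem pvReach_skip (g : String → List String) (U : List String) (p : String) (st v : List String)
    (h : p ∈ v ∨ p ∉ U) : pvReach g U (p :: st) v = pvReach g U st v := by
  rw [pvReach]; simp [h]

theorem pvReach_visit (g : String → List String) (U : List String) (p : String) (st v : List String)
    (h1 : p ∉ v) (h2 : p ∈ U) :
    pvReach g U (p :: st) v = pvReach g U (g p ++ st) (PySem.Set.add v p) := by
  rw [pvReach]
  simp [h1, h2]

theorem pvReach_append (g : String → List String) (U : List String) :
    ∀ (N : Nat) (l st v : List String), pvMu U v ≤ N →
      pvReach g U (l ++ st) v = pvReach g U st (pvReach g U l v) := by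
  intro N
  induction N with
  | zero =>
    intro l
    induction l with
    | nil => intro st v _; rw [pvReach_nil]; rfl
    | cons p l ih =>
      intro st v hμ
      by_cases h : p ∈ v ∨ p ∉ U
      · rw [List.cons_append, pvReach_skip g U p _ _ h, pvReach_skip g U p _ _ h]
        exact ih st v hμ
      · push Not at h
        exact absurd hμ (by have := pvMu_add_lt U v p h.2 h.1; omega)
  | succ N ihN =>
    intro l
    induction l with
    | nil => intro st v _; rw [pvReach_nil]; rfl
    | cons p l ih =>
      intro st v hμ
      by_cases h : p ∈ v ∨ p ∉ U
      · rw [List.cons_append, pvReach_skip g U p _ _ h, pvReach_skip g U p _ _ h]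
        exact ih st v hμ
      · push Not at h
        rw [List.cons_append, pvReach_visit g U p _ _ h.1 h.2, pvReach_visit g U p _ _ h.1 h.2]
        have hμ' : pvMu U (PySem.Set.add v p) ≤ N := by
          have := pvMu_add_lt U v p h.2 h.1; omega
        rw [← List.append_assoc]
        exact ihN (g p ++ l) st (PySem.Set.add v p) hμ'

-- B's fueled loop equals the ideal semantics once the fuel exceeds the potential
theorem stackB_eq_pvReach (g : String → List String) (U : List String)
    (hg : ∀ x, ∀ y ∈ g x, y ∈ U) :
    ∀ (n : Nat) (st v : List String), (∀ x ∈ st, x ∈ U) → pvMu U v < n →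
      stackB g n st v = pvReach g U st v := by
  intro n
  induction n with
  | zero => intro st v _ h; omega
  | succ n ihN =>
    intro st
    induction st with
    | nil => intro v _ _; rw [pvReach_nil, stackB]
    | cons p st ih =>
      intro v hst hμ
      by_cases hp : p ∈ v
      · have hc : PySem.Set.contains v p = true := by simp [pysem, hp]
        rw [stackB, if_pos hc, pvReach_skip g U p _ _ (Or.inl hp)]
        exact ih v (fun x hx => hst x (List.mem_cons_of_mem _ hx)) hμ
      · have hpU : p ∈ U := hst p List.mem_cons_self
        have hc : ¬ PySem.Set.contains v p = true := by
          simp [pysem, hp]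
        rw [stackB, if_neg hc, pvReach_visit g U p _ _ hp hpU]
        apply ihN
        · intro x hx
          rcases List.mem_append.mp hx with hx | hx
          · exact hg p x hx
          · exact hst x (List.mem_cons_of_mem _ hx)
        · have := pvMu_add_lt U v p hpU hp; omega

-- a visited node all of whose successors are visited is a no-op for A's dfs
theorem dfsA_closed (g : String → List String) (n : Nat) (q : String) (v : List String)
    (hq : q ∈ v) (hcl : ∀ y ∈ g q, y ∈ v) : dfsA g n q v = v := by
  cases n with
  | zero => rfl
  | succ n =>
    rw [dfsA]
    have hadd : PySem.Set.add v q = v := PySem.Set.add_of_mem hq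
    simp only [hadd]
    have hdiff : PySem.Set.diff (g q) v = [] := by
      apply List.eq_nil_iff_forall_not_mem.mpr
      intro y hy
      rw [PySem.Set.mem_diff] at hy
      exact hy.2 (hcl y hy.1)
    rw [hdiff]; rfl

-- the A-side fold over a snapshot, against the ideal worklist; IH is A's bridge at fuel n
theorem foldA_bridge (g : String → List String) (U : List String) (n : Nat)
    (IH : ∀ (q : String) (v P : List String),
      (∀ x ∈ v, (∀ y ∈ g x, y ∈ v) ∨ x ∈ P) → (∀ x ∈ P, x ∈ v) → q ∉ P → q ∈ U →
      pvMu U v < n →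
      dfsA g n q v = pvReach g U [q] v
      ∧ (∀ x ∈ dfsA g n q v, (∀ y ∈ g x, y ∈ dfsA g n q v) ∨ x ∈ P)
      ∧ (∀ x ∈ v, x ∈ dfsA g n q v) ∧ q ∈ dfsA g n q v) :
    ∀ (l₂ : List String) (v₀ : List String) (p : String) (P w : List String),
      p ∈ v₀ → (∀ x ∈ P, x ∈ v₀) → (∀ x ∈ v₀, x ∈ w) →
      (∀ x ∈ w, (∀ y ∈ g x, y ∈ w) ∨ x ∈ (p :: P)) →
      (∀ y ∈ l₂, y ∈ U) → pvMu U w < n →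
      (PySem.Set.diff l₂ v₀).foldl (fun a q' => dfsA g n q' a) w = pvReach g U l₂ w
      ∧ (∀ x ∈ (PySem.Set.diff l₂ v₀).foldl (fun a q' => dfsA g n q' a) w,
          (∀ y ∈ g x, y ∈ (PySem.Set.diff l₂ v₀).foldl (fun a q' => dfsA g n q' a) w) ∨ x ∈ (p :: P))
      ∧ (∀ x ∈ w, x ∈ (PySem.Set.diff l₂ v₀).foldl (fun a q' => dfsA g n q' a) w)
      ∧ (∀ x ∈ l₂, x ∈ (PySem.Set.diff l₂ v₀).foldl (fun a q' => dfsA g n q' a) w) := by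
  intro l₂
  induction l₂ with
  | nil =>
    intro v₀ p P w hpv hPv hvw hinv _ _
    have hd : PySem.Set.diff ([] : List String) v₀ = [] := by simp [PySem.Set.diff]
    rw [hd, pvReach_nil]
    exact ⟨rfl, hinv, fun x hx => hx, fun x hx => nomatch hx⟩
  | cons q l ih =>
    intro v₀ p P w hpv hPv hvw hinv hlU hμ
    by_cases hq : q ∈ v₀
    · have hd : PySem.Set.diff (q :: l) v₀ = PySem.Set.diff l v₀ := by
        simp [PySem.Set.diff, hq]
      rw [hd, pvReach_skip g U q l w (Or.inl (hvw q hq))]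
      obtain ⟨h1, h2, h3, h4⟩ := ih v₀ p P w hpv hPv hvw hinv
        (fun y hy => hlU y (List.mem_cons_of_mem _ hy)) hμ
      refine ⟨h1, h2, h3, ?_⟩
      intro x hx
      rcases List.mem_cons.mp hx with rfl | hx
      · exact h3 x (hvw x hq)
      · exact h4 x hx
    · have hd : PySem.Set.diff (q :: l) v₀ = q :: PySem.Set.diff l v₀ := by
        simp [PySem.Set.diff, hq]
      have hqp : q ≠ p := fun e => hq (e ▸ hpv)
      have hqP : q ∉ P := fun h => hq (hPv q h)
      rw [hd, List.foldl_cons]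
      by_cases hqw : q ∈ w
      · -- already visited: no-op on both sides
        have hcl : ∀ y ∈ g q, y ∈ w := by
          rcases hinv q hqw with h | h
          · exact h
          · rcases List.mem_cons.mp h with rfl | h
            · exact absurd rfl hqp
            · exact absurd h hqP
        rw [dfsA_closed g n q w hqw hcl, pvReach_skip g U q l w (Or.inl hqw)]
        obtain ⟨h1, h2, h3, h4⟩ := ih v₀ p P w hpv hPv hvw hinv
          (fun y hy => hlU y (List.mem_cons_of_mem _ hy)) hμ
        refine ⟨h1, h2, h3, ?_⟩
        intro x hx
        rcases List.mem_cons.mp hx with rfl | hx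
        · exact h3 x hqw
        · exact h4 x hx
      · -- a genuinely new node: one recursive dfs call = one ideal visit
        have hqU : q ∈ U := hlU q List.mem_cons_self
        have hPv' : ∀ x ∈ (p :: P), x ∈ w := by
          intro x hx
          rcases List.mem_cons.mp hx with rfl | hx
          · exact hvw x hpv
          · exact hvw x (hPv x hx)
        have hqPP : q ∉ (p :: P) := by
          intro hx
          rcases List.mem_cons.mp hx with rfl | hx
          · exact hqp rfl
          · exact hqP hx
        obtain ⟨heq, hinv2, hsub2, hqin⟩ := IH q w (p :: P) hinv hPv' hqPP hqU hμ
        have hμ2 : pvMu U (dfsA g n q w) < n :=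
          lt_of_le_of_lt (pvMu_le_of_subset U w (dfsA g n q w) hsub2) hμ
        obtain ⟨h1, h2, h3, h4⟩ := ih v₀ p P (dfsA g n q w) hpv hPv
          (fun x hx => hsub2 x (hvw x hx)) hinv2
          (fun y hy => hlU y (List.mem_cons_of_mem _ hy)) hμ2
        have hre : pvReach g U (q :: l) w = pvReach g U l (dfsA g n q w) := by
          have : (q :: l) = [q] ++ l := rfl
          rw [this, pvReach_append g U (pvMu U w) [q] l w le_rfl, ← heq]
        refine ⟨by rw [h1, hre], h2, ?_, ?_⟩
        · intro x hx
          exact h3 x (hsub2 x hx)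
        · intro x hx
          rcases List.mem_cons.mp hx with rfl | hx
          · exact h3 x hqin
          · exact h4 x hx

-- A's recursive dfs equals the ideal worklist on one seed, under the closedness invariant
theorem dfsA_bridge (g : String → List String) (U : List String)
    (hg : ∀ x, ∀ y ∈ g x, y ∈ U) :
    ∀ (n : Nat) (q : String) (v P : List String),
      (∀ x ∈ v, (∀ y ∈ g x, y ∈ v) ∨ x ∈ P) → (∀ x ∈ P, x ∈ v) → q ∉ P → q ∈ U →
      pvMu U v < n →
      dfsA g n q v = pvReach g U [q] v
      ∧ (∀ x ∈ dfsA g n q v, (∀ y ∈ g x, y ∈ dfsA g n q v) ∨ x ∈ P)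
      ∧ (∀ x ∈ v, x ∈ dfsA g n q v) ∧ q ∈ dfsA g n q v := by
  intro n
  induction n with
  | zero => intro q v P _ _ _ _ h; omega
  | succ n ihN =>
    intro q v P hinv hPv hqP hqU hμ
    by_cases hqv : q ∈ v
    · have hcl : ∀ y ∈ g q, y ∈ v := by
        rcases hinv q hqv with h | h
        · exact h
        · exact absurd h hqP
      rw [dfsA_closed g (n+1) q v hqv hcl,
        pvReach_skip g U q [] v (Or.inl hqv), pvReach_nil]
      exact ⟨rfl, hinv, fun x hx => hx, hqv⟩
    · have hqv' : q ∈ PySem.Set.add v q := by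
        rw [PySem.Set.mem_add]; exact Or.inr rfl
      have hsub : ∀ x ∈ v, x ∈ PySem.Set.add v q := by
        intro x hx; rw [PySem.Set.mem_add]; exact Or.inl hx
      have hinv' : ∀ x ∈ PySem.Set.add v q,
          (∀ y ∈ g x, y ∈ PySem.Set.add v q) ∨ x ∈ (q :: P) := by
        intro x hx
        rw [PySem.Set.mem_add] at hx
        rcases hx with hx | rfl
        · rcases hinv x hx with h | h
          · exact Or.inl (fun y hy => hsub y (h y hy))
          · exact Or.inr (List.mem_cons_of_mem _ h)
        · exact Or.inr List.mem_cons_self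
      have hPv' : ∀ x ∈ P, x ∈ PySem.Set.add v q := fun x hx => hsub x (hPv x hx)
      have hμ' : pvMu U (PySem.Set.add v q) < n := by
        have := pvMu_add_lt U v q hqU hqv; omega
      obtain ⟨heq, hinv2, hsub2, hall⟩ := foldA_bridge g U n ihN (g q)
        (PySem.Set.add v q) q P (PySem.Set.add v q) hqv' hPv' (fun x hx => hx)
        hinv' (hg q) hμ'
      have hun : dfsA g (n+1) q v
          = (PySem.Set.diff (g q) (PySem.Set.add v q)).foldl (fun a q' => dfsA g n q' a)
            (PySem.Set.add v q) := by
        rw [dfsA]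
      rw [hun]
      have hre : pvReach g U [q] v = pvReach g U (g q) (PySem.Set.add v q) := by
        rw [pvReach_visit g U q [] v hqv hqU, List.append_nil]
      refine ⟨by rw [heq, hre], ?_, ?_, hsub2 q hqv'⟩
      · intro x hx
        rcases hinv2 x hx with h | h
        · exact Or.inl h
        · rcases List.mem_cons.mp h with rfl | h
          · exact Or.inl (fun y hy => hall y hy)
          · exact Or.inr h
      · intro x hx
        exact hsub2 x (hsub x hx)

-- ---- the two adjacency maps agree on every lookup ----

theorem buildA_inner_getD (l : String) :
    ∀ (r : List String) (d : PySem.Dict String (List String)) (k : String),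
      (r.foldl (fun d2 rule => d2.insert l (PySem.Set.add (d2.getD l []) rule)) d).getD k []
      = if k = l then r.foldl (fun b s => PySem.Set.add b s) (d.getD l []) else d.getD k [] := by
  intro r
  induction r with
  | nil => intro d k; simp only [List.foldl_nil]; split <;> simp_all
  | cons s r ih =>
    intro d k
    rw [List.foldl_cons, List.foldl_cons, ih]
    rw [PySem.Dict.getD_insert, PySem.Dict.getD_insert]
    split <;> simp_all

theorem ite_append_eq_add (b : List String) (s : String) :
    (if b.contains s then b else b ++ [s]) = PySem.Set.add b s := rfl

theorem build_getD_eq :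
    ∀ (G : List (String × List String)) (d1 d2 : PySem.Dict String (List String)),
      (∀ k, d1.getD k [] = d2.getD k []) → ∀ k,
      (G.foldl (fun d pr =>
          pr.2.foldl (fun d2 rule => d2.insert pr.1 (PySem.Set.add (d2.getD pr.1 []) rule)) d)
        d1).getD k []
      = (G.foldl (fun d pr =>
          d.insert pr.1 (pr.2.foldl (fun b s => if b.contains s then b else b ++ [s]) (d.getD pr.1 [])))
        d2).getD k [] := by
  intro G
  induction G with
  | nil => intro d1 d2 h k; exact h k
  | cons pr G ih =>
    intro d1 d2 h k
    rw [List.foldl_cons, List.foldl_cons]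
    apply ih
    intro k'
    rw [buildA_inner_getD, PySem.Dict.getD_insert]
    have hfn : ∀ (b : List String),
        pr.2.foldl (fun b s => if b.contains s then b else b ++ [s]) b
        = pr.2.foldl (fun b s => PySem.Set.add b s) b := by
      intro b
      exact PySem.List.foldl_congr_mem _ _ _ _ (fun acc x _ => ite_append_eq_add acc x)
    rw [hfn]
    split <;> simp_all

-- ---- every symbol stored in B's adjacency map lies in U ----

theorem build_values_sub (S : List String) :
    ∀ (G : List (String × List String)) (d : PySem.Dict String (List String)),
      (∀ k y, y ∈ d.getD k [] → y ∈ S) → (∀ pr ∈ G, ∀ y ∈ pr.2, y ∈ S) →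
      ∀ k y, y ∈ (G.foldl (fun d pr =>
          d.insert pr.1 (pr.2.foldl (fun b s => if b.contains s then b else b ++ [s]) (d.getD pr.1 [])))
        d).getD k [] → y ∈ S := by
  intro G
  induction G with
  | nil => intro d hd _ k y hy; exact hd k y hy
  | cons pr G ih =>
    intro d hd hG k y hy
    rw [List.foldl_cons] at hy
    refine ih _ ?_ (fun p hp => hG p (List.mem_cons_of_mem _ hp)) k y hy
    intro k' y' hy'
    rw [PySem.Dict.getD_insert] at hy'
    split at hy'
    · have hfn : ∀ (b : List String),
          pr.2.foldl (fun b s => if b.contains s then b else b ++ [s]) b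
          = pr.2.foldl (fun b s => PySem.Set.add b s) b := by
        intro b
        exact PySem.List.foldl_congr_mem _ _ _ _ (fun acc x _ => ite_append_eq_add acc x)
      rw [hfn] at hy'
      have := (PySem.Set.mem_foldl_add pr.2 (d.getD pr.1 []) y' (f := fun (x : String) => x)).mp hy'
      rcases this with h | ⟨b, hb, hbe⟩
      · exact hd pr.1 y' h
      · exact hbe ▸ hG pr List.mem_cons_self b hb
    · exact hd k' y' hy'

-- ---- membership in the bad-left set built by B's one-pass loop ----

theorem mem_foldl_ite_add (c : (String × List String) → Bool) :
    ∀ (items : List (String × List String)) (b0 : List String) (x : String),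
      (x ∈ items.foldl (fun b pr => if c pr then PySem.Set.add b pr.1 else b) b0)
      ↔ (x ∈ b0 ∨ ∃ pr ∈ items, c pr = true ∧ x = pr.1) := by
  intro items
  induction items with
  | nil => simp
  | cons pr items ih =>
    intro b0 x
    rw [List.foldl_cons]
    by_cases hc : c pr = true
    · rw [if_pos hc, ih]
      rw [PySem.Set.mem_add]
      constructor
      · rintro (⟨h | rfl⟩ | ⟨p, hp, h1, h2⟩)
        · exact Or.inl h
        · exact Or.inr ⟨pr, List.mem_cons_self, hc, rfl⟩
        · exact Or.inr ⟨p, List.mem_cons_of_mem _ hp, h1, h2⟩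
      · rintro (h | ⟨p, hp, h1, h2⟩)
        · exact Or.inl (Or.inl h)
        · rcases List.mem_cons.mp hp with rfl | hp
          · exact Or.inl (Or.inr h2)
          · exact Or.inr ⟨p, hp, h1, h2⟩
    · rw [if_neg hc, ih]
      constructor
      · rintro (h | ⟨p, hp, h1, h2⟩)
        · exact Or.inl h
        · exact Or.inr ⟨p, List.mem_cons_of_mem _ hp, h1, h2⟩
      · rintro (h | ⟨p, hp, h1, h2⟩)
        · exact Or.inl h
        · rcases List.mem_cons.mp hp with rfl | hp
          · exact absurd h1 hc
          · exact Or.inr ⟨p, hp, h1, h2⟩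

-- ---- the per-rule drop test of A agrees with membership in B's bad set ----

theorem newG_eq (nonterm visited : List String) (grammar : List (String × List String)) :
    grammar.foldl (fun acc pr =>
      if PySem.Set.contains (PySem.Set.diff nonterm visited) pr.1
         || decide (0 < (PySem.Set.inter
              ((grammar.foldl (fun d pr =>
                  pr.2.foldl (fun d2 rule => d2.insert pr.1 (PySem.Set.add (d2.getD pr.1 []) rule)) d)
                PySem.Dict.empty).getD pr.1 [])
              (PySem.Set.diff nonterm visited)).length)
      then acc else acc ++ [pr]) []
    = grammar.filter (fun pr => !(PySem.Set.contains
        ((grammar.foldl (fun d pr =>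
            d.insert pr.1 (pr.2.foldl (fun b s => if b.contains s then b else b ++ [s]) (d.getD pr.1 [])))
          PySem.Dict.empty).items.foldl (fun b pr =>
            if (nonterm.contains pr.1 && !(visited.contains pr.1))
               || pr.2.any (fun s => nonterm.contains s && !(visited.contains s))
            then PySem.Set.add b pr.1 else b) [])
        pr.1)) := by
  set succ : PySem.Dict String (List String) :=
    grammar.foldl (fun d pr =>
      d.insert pr.1 (pr.2.foldl (fun b s => if b.contains s then b else b ++ [s]) (d.getD pr.1 [])))
      PySem.Dict.empty with hsucc
  set bad : List String :=
    succ.items.foldl (fun b pr =>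
      if (nonterm.contains pr.1 && !(visited.contains pr.1))
         || pr.2.any (fun s => nonterm.contains s && !(visited.contains s))
      then PySem.Set.add b pr.1 else b) [] with hbad
  have hnodup : succ.keys.Nodup := by
    rw [hsucc]
    exact PySem.Dict.nodup_keys_foldl_insert_key grammar Prod.fst _ PySem.Dict.empty
      PySem.Dict.nodup_keys_empty
  -- the drop test, per grammar rule
  have hcond : ∀ pr ∈ grammar,
      (PySem.Set.contains (PySem.Set.diff nonterm visited) pr.1
        || decide (0 < (PySem.Set.inter
             ((grammar.foldl (fun d pr =>
                 pr.2.foldl (fun d2 rule => d2.insert pr.1 (PySem.Set.add (d2.getD pr.1 []) rule)) d)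
               PySem.Dict.empty).getD pr.1 [])
             (PySem.Set.diff nonterm visited)).length))
      = PySem.Set.contains bad pr.1 := by
    intro pr hpr
    have hcontains : succ.contains pr.1 = true := by
      rw [PySem.Dict.contains_iff_mem_keys, hsucc,
        PySem.Dict.keys_foldl_insert_key grammar Prod.fst]
      rw [PySem.Dict.keys_empty, PySem.Set.update_nil_left, PySem.Set.mem_ofList]
      exact List.mem_map_of_mem hpr
    obtain ⟨rs, hrs⟩ : ∃ rs, succ.get? pr.1 = some rs := by
      rw [PySem.Dict.contains_eq_isSome_get?] at hcontains
      exact Option.isSome_iff_exists.mp hcontains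
    have hgetD : succ.getD pr.1 [] = rs := PySem.Dict.getD_of_get?_eq_some succ [] hrs
    have hitem : (pr.1, rs) ∈ succ.items := PySem.Dict.mem_items_of_get?_eq_some succ hrs
    have hAB : (grammar.foldl (fun d pr =>
          pr.2.foldl (fun d2 rule => d2.insert pr.1 (PySem.Set.add (d2.getD pr.1 []) rule)) d)
        PySem.Dict.empty).getD pr.1 [] = rs := by
      rw [build_getD_eq grammar PySem.Dict.empty PySem.Dict.empty (fun _ => rfl) pr.1, ← hsucc, hgetD]
    rw [hAB]
    -- Prop-level version of both Bools
    have hiff : (PySem.Set.contains (PySem.Set.diff nonterm visited) pr.1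
          || decide (0 < (PySem.Set.inter rs (PySem.Set.diff nonterm visited)).length)) = true
        ↔ PySem.Set.contains bad pr.1 = true := by
      have hL : (PySem.Set.contains (PySem.Set.diff nonterm visited) pr.1
            || decide (0 < (PySem.Set.inter rs (PySem.Set.diff nonterm visited)).length)) = true
          ↔ ((pr.1 ∈ nonterm ∧ pr.1 ∉ visited) ∨ ∃ s ∈ rs, s ∈ nonterm ∧ s ∉ visited) := by
        rw [Bool.or_eq_true]
        constructor
        · rintro (h | h)
          · left
            have h' : pr.1 ∈ PySem.Set.diff nonterm visited := by simpa [pysem] using h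
            rw [PySem.Set.mem_diff] at h'
            exact h'
          · right
            rw [decide_eq_true_iff, List.length_pos_iff] at h
            rcases List.exists_mem_of_ne_nil _ h with ⟨s, hs⟩
            rw [PySem.Set.mem_inter] at hs
            obtain ⟨hs1, hs2⟩ := hs
            rw [PySem.Set.mem_diff] at hs2
            exact ⟨s, hs1, hs2⟩
        · rintro (h | ⟨s, hs, h1, h2⟩)
          · left
            have h' : pr.1 ∈ PySem.Set.diff nonterm visited := by
              rw [PySem.Set.mem_diff]; exact h
            simpa [pysem] using h'
          · right
            rw [decide_eq_true_iff, List.length_pos_iff]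
            intro hnil
            have hmem : s ∈ PySem.Set.inter rs (PySem.Set.diff nonterm visited) := by
              rw [PySem.Set.mem_inter]
              exact ⟨hs, by rw [PySem.Set.mem_diff]; exact ⟨h1, h2⟩⟩
            rw [hnil] at hmem
            exact (List.not_mem_nil) hmem
      have hR : PySem.Set.contains bad pr.1 = true
          ↔ ((pr.1 ∈ nonterm ∧ pr.1 ∉ visited) ∨ ∃ s ∈ rs, s ∈ nonterm ∧ s ∉ visited) := by
        rw [show PySem.Set.contains bad pr.1 = true ↔ pr.1 ∈ bad by simp [pysem]]
        rw [hbad, mem_foldl_ite_add]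
        constructor
        · rintro (h | ⟨p, hp, h1, h2⟩)
          · exact absurd h (List.not_mem_nil)
          · -- p is the unique item with key pr.1, so p = (pr.1, rs)
            have hpv : succ.getD p.1 [] = p.2 :=
              PySem.Dict.getD_of_mem_items succ
                (show (p.1, p.2) ∈ succ.items by simpa using hp) hnodup []
            rw [← h2] at hpv
            have hp2 : p.2 = rs := by rw [hgetD] at hpv; exact hpv.symm
            rw [Bool.or_eq_true, Bool.and_eq_true, List.any_eq_true] at h1
            rcases h1 with ⟨ha, hb⟩ | ⟨s, hs, hsab⟩
            · left
              refine ⟨?_, ?_⟩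
              · rw [← h2] at ha; simpa using ha
              · rw [← h2] at hb; simpa using hb
            · right
              rw [Bool.and_eq_true] at hsab
              exact ⟨s, hp2 ▸ hs, by simpa using hsab.1, by simpa using hsab.2⟩
        · intro h
          refine Or.inr ⟨(pr.1, rs), hitem, ?_, rfl⟩
          rw [Bool.or_eq_true, Bool.and_eq_true, List.any_eq_true]
          rcases h with ⟨h1, h2⟩ | ⟨s, hs, h1, h2⟩
          · exact Or.inl ⟨by simpa using h1, by simpa using h2⟩
          · exact Or.inr ⟨s, hs, by rw [Bool.and_eq_true]; exact ⟨by simpa using h1, by simpa using h2⟩⟩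
      rw [hL, hR]
    exact Bool.coe_iff_coe.mp hiff
  -- turn A's append loop into a filter
  have hstep : grammar.foldl (fun acc pr =>
      if PySem.Set.contains (PySem.Set.diff nonterm visited) pr.1
         || decide (0 < (PySem.Set.inter
              ((grammar.foldl (fun d pr =>
                  pr.2.foldl (fun d2 rule => d2.insert pr.1 (PySem.Set.add (d2.getD pr.1 []) rule)) d)
                PySem.Dict.empty).getD pr.1 [])
              (PySem.Set.diff nonterm visited)).length)
      then acc else acc ++ [pr]) []
      = grammar.foldl (fun acc pr =>
          if (!(PySem.Set.contains bad pr.1)) = true then acc ++ [pr] else acc) [] := by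
    apply PySem.List.foldl_congr_mem
    intro acc pr hpr
    rw [hcond pr hpr]
    by_cases hb : PySem.Set.contains bad pr.1 = true
    · rw [if_pos hb]
      rw [hb]
      simp
    · rw [if_neg hb]
      rw [Bool.not_eq_true] at hb
      rw [hb]
      simp
  rw [hstep, PySem.List.foldl_append_if_eq_filter]
  simp

-- ===== VERDICT (by name: the statement is the Claim_ definition above) =====
theorem remove_useless_rules_spec : Claim_equal_remove_useless_rules := by
  unfold Claim_equal_remove_useless_rules
  intro start nonterm grammar _
  unfold Spec_remove_useless_rules remove_useless_rules remove_useless_rules_alt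
  simp only []
  set U : List String := start :: grammar.flatMap (fun pr => pr.1 :: pr.2) with hU
  set succ : PySem.Dict String (List String) :=
    grammar.foldl (fun d pr =>
      d.insert pr.1 (pr.2.foldl (fun b s => if b.contains s then b else b ++ [s]) (d.getD pr.1 [])))
      PySem.Dict.empty with hsucc
  have hUg : ∀ x, ∀ y ∈ succ.getD x [], y ∈ U := by
    intro x y hy
    refine build_values_sub U grammar PySem.Dict.empty ?_ ?_ x y hy
    · intro k y' hy'
      rw [PySem.Dict.getD_empty] at hy'
      cases hy'
    · intro pr hpr y' hy'
      exact List.mem_cons_of_mem _ (List.mem_flatMap.mpr ⟨pr, hpr, List.mem_cons_of_mem _ hy'⟩)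
  have hfun : (fun x => (grammar.foldl (fun d pr =>
        pr.2.foldl (fun d2 rule => d2.insert pr.1 (PySem.Set.add (d2.getD pr.1 []) rule)) d)
      PySem.Dict.empty).getD x []) = (fun x => succ.getD x []) :=
    funext (fun x => build_getD_eq grammar PySem.Dict.empty PySem.Dict.empty (fun _ => rfl) x)
  have hmu : pvMu U [] = U.length := by simp [pvMu]
  have hvis : dfsA (fun x => (grammar.foldl (fun d pr =>
        pr.2.foldl (fun d2 rule => d2.insert pr.1 (PySem.Set.add (d2.getD pr.1 []) rule)) d)
      PySem.Dict.empty).getD x []) (U.length + 1) start []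
      = stackB (fun x => succ.getD x []) (U.length + 1) [start] [] := by
    rw [hfun]
    have h1 := (dfsA_bridge (fun x => succ.getD x []) U hUg (U.length + 1) start [] []
      (fun x hx => absurd hx (List.not_mem_nil))
      (fun x hx => absurd hx (List.not_mem_nil))
      (List.not_mem_nil) List.mem_cons_self (by rw [hmu]; omega)).1
    have h2 := stackB_eq_pvReach (fun x => succ.getD x []) U hUg (U.length + 1) [start] []
      (by intro x hx
          rcases List.mem_cons.mp hx with rfl | hx
          · exact List.mem_cons_self
          · cases hx)
      (by rw [hmu]; omega)
    rw [h1, h2]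
  rw [hvis, newG_eq nonterm (stackB (fun x => succ.getD x []) (U.length + 1) [start] []) grammar]
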